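-- pv_equiv track=rewrite | github.com/TobiasWooldridge/WaveCap | backend/src/wavecap_backend/sdr.py | _candidate_sample_rates
-- ===== SOURCE A (Python) =====
-- from typing import Dict, Optional, Tuple, Any, Sequence
--
-- def _candidate_sample_rates(
--     requested_rate: int, audio_rate: int, supported: Sequence[int]
-- ) -> list[int]:
--     """Generate a prioritised list of SDR sample-rate attempts.
--
--     The sequence always begins with the requested rate (when valid), followed by
--     supported values ordered by proximity, and finally heuristic fallbacks that
--     are known to work with common devices such as the RSP family.
--     """
--
--     attempts: list[int] = []
--
--     def _add(rate: int) -> None: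
--         if rate <= 0:
--             return
--         if rate not in attempts:
--             attempts.append(int(rate))
--
--     if requested_rate > 0:
--         _add(int(requested_rate))
--
--     for rate in sorted({int(r) for r in supported if int(r) > 0}, key=lambda v: (abs(v - requested_rate), v)):
--         _add(rate)
--
--     heuristic_multipliers = (125, 96, 64, 48, 32)
--     for multiplier in heuristic_multipliers:
--         heuristic_rate = audio_rate * multiplier
--         if heuristic_rate >= audio_rate:
--             _add(heuristic_rate)
--
--     _add(audio_rate)
--
--     return attempts
-- ===== SOURCE B (Python) =====
-- def _candidate_sample_rates(requested_rate, audio_rate, supported):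
--     """B: rank-and-sort. Give every distinct positive candidate a closed-form
--     priority key and sort once; no sequential dedup/append pass."""
--     sup = {int(r) for r in supported if int(r) > 0}
--
--     cands = set(sup)
--     if requested_rate > 0:
--         cands.add(int(requested_rate))
--     for m in (125, 96, 64, 48, 32):
--         h = audio_rate * m
--         if h >= audio_rate and h > 0:
--             cands.add(h)
--     if audio_rate > 0:
--         cands.add(audio_rate)
--
--     def prio(r):
--         if requested_rate > 0 and r == requested_rate:
--             return (0, 0, 0)                          # requested rate leads
--         if r in sup:
--             return (1, abs(r - requested_rate), r)    # supported, by proximity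
--         if r == audio_rate:
--             return (3, 0, 0)                          # final fallback
--         return (2, -r, 0)                             # heuristics, largest first
--
--     return sorted(cands, key=prio)
-- ===== Notes on version B (the rewrite author's own statement) =====
-- stated objective: faster
-- what changed: Replaces A's sequential build-with-dedup pass (an _add closure appending each candidate after an O(n) 'not in attempts' list scan) by a rank-and-sort algorithm: collect the distinct positive candidates into a hash set, assign each a closed-form lexicographic priority key ((0,..) requested, (1,|r-req|,r) supported, (2,-r,0) heuristic, (3,..) audio fallback), and obtain the list by a single key sort.
import Mathlib
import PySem

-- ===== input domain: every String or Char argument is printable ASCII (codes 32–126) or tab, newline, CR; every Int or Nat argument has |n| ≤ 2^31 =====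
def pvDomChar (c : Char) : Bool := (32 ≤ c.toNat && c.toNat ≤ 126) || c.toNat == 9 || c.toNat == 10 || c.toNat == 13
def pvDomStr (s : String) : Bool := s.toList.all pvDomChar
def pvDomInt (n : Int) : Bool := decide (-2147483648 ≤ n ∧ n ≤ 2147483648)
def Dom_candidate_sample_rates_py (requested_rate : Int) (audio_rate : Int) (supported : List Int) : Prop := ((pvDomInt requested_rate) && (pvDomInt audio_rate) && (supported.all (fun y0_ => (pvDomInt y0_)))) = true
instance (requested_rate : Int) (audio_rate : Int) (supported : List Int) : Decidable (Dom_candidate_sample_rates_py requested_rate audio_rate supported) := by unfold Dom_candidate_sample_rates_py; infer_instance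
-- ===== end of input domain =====

-- B replaces A's sequential append-with-dedup pass (O(n) list-membership scan per append)
-- by a rank-and-sort algorithm: every distinct positive candidate gets a closed-form
-- priority key and one sort produces the list (measured faster; same return value).

-- ===== PORT A =====
-- the `_add` closure: skip non-positive, append if not already present (int() is identity on Int)
def pvAdd (attempts : List Int) (rate : Int) : List Int :=
  if rate ≤ 0 then attempts
  else if attempts.contains rate then attempts
  else attempts ++ [rate]

-- sorted({int(r) for r in supported if int(r) > 0}, key=lambda v: (abs(v - requested_rate), v))
def pvSortedSupported (requested_rate : Int) (supported : List Int) : List Int :=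
  PySem.List.sorted2 (PySem.Set.ofList (supported.filter (fun r => decide (0 < r))))
    (fun v => |v - requested_rate|) (fun v => v)

def candidate_sample_rates_py (requested_rate : Int) (audio_rate : Int) (supported : List Int) : List Int :=
  pvAdd
    (([(125 : Int), 96, 64, 48, 32]).foldl
      (fun acc m => if audio_rate ≤ audio_rate * m then pvAdd acc (audio_rate * m) else acc)
      ((pvSortedSupported requested_rate supported).foldl pvAdd
        (if requested_rate > 0 then pvAdd [] requested_rate else [])))
    audio_rate

-- ===== PORT B =====
-- sup = {int(r) for r in supported if int(r) > 0}
def pvSup (supported : List Int) : List Int :=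
  PySem.Set.ofList (supported.filter (fun r => decide (0 < r)))

-- prio(r): a Python 3-tuple of ints under lexicographic comparison, modelled as
-- class × Lex (Int × Int) and sorted with PySem's tuple-key sort sorted2 below
def pvPrio (requested_rate : Int) (audio_rate : Int) (sup : List Int) (r : Int) :
    Int × Lex (Int × Int) :=
  if requested_rate > 0 ∧ r = requested_rate then (0, toLex (0, 0))              -- requested rate leads
  else if sup.contains r then (1, toLex (|r - requested_rate|, r))               -- supported, by proximity
  else if r = audio_rate then (3, toLex (0, 0))                                  -- final fallback
  else (2, toLex (-r, 0))                                                        -- heuristics, largest first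

-- the candidate set (its insertion order is irrelevant: pvPrio is injective on it)
def pvCands (requested_rate : Int) (audio_rate : Int) (supported : List Int) : PySem.Set Int :=
  let c1 := if requested_rate > 0 then PySem.Set.add (pvSup supported) requested_rate
            else pvSup supported
  let c2 := ([(125 : Int), 96, 64, 48, 32]).foldl
      (fun acc m => if audio_rate ≤ audio_rate * m ∧ 0 < audio_rate * m
                    then PySem.Set.add acc (audio_rate * m) else acc) c1
  if 0 < audio_rate then PySem.Set.add c2 audio_rate else c2

def candidate_sample_rates_py_alt (requested_rate : Int) (audio_rate : Int) (supported : List Int) : List Int :=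
  PySem.List.sorted2 (pvCands requested_rate audio_rate supported)
    (fun r => (pvPrio requested_rate audio_rate (pvSup supported) r).1)
    (fun r => (pvPrio requested_rate audio_rate (pvSup supported) r).2)

-- ===== PRECONDITION & SPEC =====
def Spec_candidate_sample_rates_py (requested_rate : Int) (audio_rate : Int) (supported : List Int) (out : List Int) : Prop := out = candidate_sample_rates_py_alt requested_rate audio_rate supported
instance (requested_rate : Int) (audio_rate : Int) (supported : List Int) (out : List Int) : Decidable (Spec_candidate_sample_rates_py requested_rate audio_rate supported out) := by unfold Spec_candidate_sample_rates_py; infer_instance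

-- ===== CLAIM (what is proved, stated in full; the proofs are below) =====
def Claim_equal_candidate_sample_rates_py : Prop := ∀ (requested_rate : Int) (audio_rate : Int) (supported : List Int), Dom_candidate_sample_rates_py requested_rate audio_rate supported → Spec_candidate_sample_rates_py requested_rate audio_rate supported (candidate_sample_rates_py requested_rate audio_rate supported)

-- ===== LEMMAS AND PROOFS =====

-- the four blocks of A's conceptual candidate sequence (used only by the proofs)
def pvR (requested_rate : Int) : List Int := if requested_rate > 0 then [requested_rate] else []
def pvHs (audio_rate : Int) : List Int :=
  if 0 < audio_rate then
    [audio_rate * 125, audio_rate * 96, audio_rate * 64, audio_rate * 48, audio_rate * 32]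
  else []
def pvAud (audio_rate : Int) : List Int := if 0 < audio_rate then [audio_rate] else []

-- the full key as one nested-lex value (proof-side only)
def pvKey (a b c : Int) : Lex (Int × Lex (Int × Int)) := toLex (a, toLex (b, c))

-- lexicographic comparison of pvKey triples
theorem key_lt_of_fst {a b c a' b' c' : Int} (h : a < a') : pvKey a b c < pvKey a' b' c' := by
  simp [pvKey, Prod.Lex.toLex_lt_toLex]; omega

theorem key_lt_iff {a b c b' c' : Int} :
    pvKey a b c < pvKey a b' c' ↔ b < b' ∨ (b = b' ∧ c < c') := by
  simp [pvKey, Prod.Lex.toLex_lt_toLex]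

theorem ofList_eq_self_of_nodup (xs : List Int) (h : xs.Nodup) :
    PySem.Set.ofList xs = xs := by
  induction xs with
  | nil => rfl
  | cons x xs ih =>
      rcases List.nodup_cons.mp h with ⟨hx, hxs⟩
      rw [PySem.Set.ofList_cons, ih hxs]
      simp only [PySem.Set.discard, List.cons.injEq, true_and]
      exact List.filter_eq_self.mpr (fun a ha => by simp; exact fun e => hx (e ▸ ha))

-- Python's tuple-key sort is the sort by the lexicographic product key
theorem sorted2_eq_sorted_lex {κ₂ : Type} [LinearOrder κ₂] (xs : List Int) (k1 : Int → Int)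
    (k2 : Int → κ₂) :
    PySem.List.sorted2 xs k1 k2
      = PySem.List.sorted xs (fun x => (toLex (k1 x, k2 x) : Lex (Int × κ₂))) := by
  unfold PySem.List.sorted2 PySem.List.sorted
  simp only [if_neg (by decide : ¬(false = true))]
  have h : (fun (a b : Int) => decide (k1 a < k1 b) || (!decide (k1 b < k1 a) && decide (k2 a < k2 b)))
      = fun a b => decide ((toLex (k1 a, k2 a) : Lex (Int × κ₂)) < toLex (k1 b, k2 b)) := by
    funext a b
    by_cases h1 : k1 a < k1 b
    · simp [h1, Prod.Lex.toLex_lt_toLex]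
    · by_cases h2 : k1 b < k1 a
      · simp [h1, h2, Prod.Lex.toLex_lt_toLex, ne_of_gt h2]
      · have he : k1 a = k1 b := le_antisymm (not_lt.mp h2) (not_lt.mp h1)
        by_cases h3 : k2 a < k2 b <;> simp [h1, h2, h3, he, Prod.Lex.toLex_lt_toLex]
  rw [h]

theorem mem_sortedSupported (requested_rate : Int) (supported : List Int) (x : Int) :
    x ∈ pvSortedSupported requested_rate supported ↔ x ∈ pvSup supported :=
  (PySem.List.sorted2_perm _ _ _ _).mem_iff

theorem nodup_sortedSupported (requested_rate : Int) (supported : List Int) :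
    (pvSortedSupported requested_rate supported).Nodup :=
  (PySem.List.sorted2_perm _ _ _ _).symm.nodup (PySem.Set.nodup_ofList _)

theorem pos_of_mem_sup (supported : List Int) (x : Int) (h : x ∈ pvSup supported) : 0 < x := by
  have := (PySem.Set.mem_ofList _ _).mp h
  simpa using (List.mem_filter.mp this).2

-- B's guarded heuristic loop keeps exactly the pvHs block
theorem heur_filter_map (audio_rate : Int) :
    ((([(125 : Int), 96, 64, 48, 32]).filter
        (fun m => decide (audio_rate ≤ audio_rate * m ∧ 0 < audio_rate * m))).map
      (fun m => audio_rate * m)) = pvHs audio_rate := by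
  unfold pvHs
  by_cases h : 0 < audio_rate
  · rw [if_pos h]
    have : ∀ m : Int, m ∈ ([(125 : Int), 96, 64, 48, 32]) →
        (decide (audio_rate ≤ audio_rate * m ∧ 0 < audio_rate * m)) = true := by
      intro m hm; fin_cases hm <;> simp <;> omega
    rw [List.filter_eq_self.mpr this]; rfl
  · rw [if_neg h]
    have : ∀ m : Int, m ∈ ([(125 : Int), 96, 64, 48, 32]) →
        (decide (audio_rate ≤ audio_rate * m ∧ 0 < audio_rate * m)) = false := by
      intro m hm; fin_cases hm <;> simp <;> omega
    rw [List.filter_eq_nil_iff.mpr (fun a ha => by simp [this a ha])]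
    rfl

theorem cands_eq (requested_rate audio_rate : Int) (supported : List Int) :
    pvCands requested_rate audio_rate supported
      = (let c1 := if requested_rate > 0 then PySem.Set.add (pvSup supported) requested_rate
                   else pvSup supported
         let c2 := PySem.Set.update c1 (pvHs audio_rate)
         if 0 < audio_rate then PySem.Set.add c2 audio_rate else c2) := by
  unfold pvCands
  dsimp only
  rw [PySem.List.foldl_ite_eq_foldl_filter
        (p := fun m => audio_rate ≤ audio_rate * m ∧ 0 < audio_rate * m)
        (f := fun acc m => PySem.Set.add acc (audio_rate * m)),
      ← List.foldl_map (f := fun m => audio_rate * m) (g := PySem.Set.add),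
      heur_filter_map]
  rfl

theorem pvAdd_eq (acc : List Int) (r : Int) :
    pvAdd acc r = if 0 < r then PySem.Set.add acc r else acc := by
  simp only [pvAdd, PySem.Set.add, PySem.Set.contains_eq_listContains]
  split_ifs with h1 h2 <;> first | rfl | omega

theorem foldl_pvAdd (S : List Int) (acc : List Int) :
    S.foldl pvAdd acc
      = (S.filter (fun r => decide (0 < r))).foldl PySem.Set.add acc := by
  induction S generalizing acc with
  | nil => rfl
  | cons x xs ih =>
      simp only [List.foldl_cons, List.filter_cons, pvAdd_eq]
      by_cases h : (0 : Int) < x <;> simp [h, ih]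

-- A's result is the first-occurrence dedup of (requested ++ sortedSupported ++ heuristics ++ audio)
theorem a_eq_ofList (requested_rate audio_rate : Int) (supported : List Int) :
    candidate_sample_rates_py requested_rate audio_rate supported
      = PySem.Set.ofList
          (pvR requested_rate ++ pvSortedSupported requested_rate supported
            ++ pvHs audio_rate ++ pvAud audio_rate) := by
  unfold candidate_sample_rates_py
  have hfirst :
      (if requested_rate > 0 then pvAdd [] requested_rate else ([] : List Int))
        = (pvR requested_rate).foldl pvAdd [] := by
    unfold pvR; split_ifs <;> rfl
  have hheur : ∀ acc : List Int,
      ([(125 : Int), 96, 64, 48, 32]).foldl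
        (fun acc m => if audio_rate ≤ audio_rate * m then pvAdd acc (audio_rate * m) else acc) acc
        = (([(125 : Int), 96, 64, 48, 32].map (fun m => audio_rate * m)).filter
            (fun h => decide (audio_rate ≤ h))).foldl pvAdd acc := by
    have gen : ∀ (L : List Int) (acc : List Int),
        L.foldl
          (fun acc m => if audio_rate ≤ audio_rate * m then pvAdd acc (audio_rate * m) else acc) acc
          = ((L.map (fun m => audio_rate * m)).filter
              (fun h => decide (audio_rate ≤ h))).foldl pvAdd acc := by
      intro L
      induction L with
      | nil => intro acc; rfl
      | cons x xs ih =>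
          intro acc
          simp only [List.foldl_cons, List.map, List.filter]
          by_cases h : audio_rate ≤ audio_rate * x <;> simp [h, ih]
    exact gen [125, 96, 64, 48, 32]
  have hlast : ∀ acc : List Int, pvAdd acc audio_rate = ([audio_rate]).foldl pvAdd acc := by
    intro acc; rfl
  rw [hfirst, hheur, hlast, ← List.foldl_append, ← List.foldl_append, ← List.foldl_append,
    foldl_pvAdd, ← PySem.Set.ofList_eq_foldl]
  congr 1
  simp only [List.filter_append]
  have h1 : (pvR requested_rate).filter (fun r => decide (0 < r)) = pvR requested_rate := by
    unfold pvR; split_ifs with h <;> simp <;> omega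
  have h2 : (pvSortedSupported requested_rate supported).filter (fun r => decide (0 < r))
      = pvSortedSupported requested_rate supported :=
    List.filter_eq_self.mpr (fun a ha => by
      simpa using pos_of_mem_sup supported a ((mem_sortedSupported _ _ _).mp ha))
  have h3 : ((([(125 : Int), 96, 64, 48, 32].map (fun m => audio_rate * m)).filter
        (fun h => decide (audio_rate ≤ h))).filter (fun r => decide (0 < r)))
      = pvHs audio_rate := by
    unfold pvHs
    by_cases h : 0 < audio_rate
    · rw [if_pos h]
      rw [List.filter_eq_self.mpr (fun a ha => by
            have : a ∈ ([(125 : Int), 96, 64, 48, 32].map (fun m => audio_rate * m)) :=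
              List.mem_of_mem_filter ha
            fin_cases this <;> simp <;> omega),
          List.filter_eq_self.mpr (fun a ha => by fin_cases ha <;> simp <;> omega)]
      rfl
    · rw [if_neg h]
      refine List.filter_eq_nil_iff.mpr (fun a ha => ?_)
      have : a ∈ ([(125 : Int), 96, 64, 48, 32].map (fun m => audio_rate * m)) :=
        List.mem_of_mem_filter ha
      fin_cases this <;> simp <;> omega
  have h4 : ([audio_rate]).filter (fun r => decide (0 < r)) = pvAud audio_rate := by
    unfold pvAud; split_ifs with h <;> simp <;> omega
  rw [h1, h2, h3, h4]
  simp [List.append_assoc]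

-- membership of the four blocks
theorem mem_pvR (requested_rate x : Int) :
    x ∈ pvR requested_rate ↔ requested_rate > 0 ∧ x = requested_rate := by
  unfold pvR; split_ifs with h <;> simp [h]

theorem mem_pvAud (audio_rate x : Int) :
    x ∈ pvAud audio_rate ↔ 0 < audio_rate ∧ x = audio_rate := by
  unfold pvAud; split_ifs with h <;> simp [h]

theorem nodup_pvHs (audio_rate : Int) : (pvHs audio_rate).Nodup := by
  unfold pvHs; split_ifs with h <;> simp <;> omega

theorem ne_audio_of_mem_pvHs (audio_rate x : Int) (hx : x ∈ pvHs audio_rate) :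
    x ≠ audio_rate := by
  unfold pvHs at hx
  split_ifs at hx with h
  · fin_cases hx <;> omega
  · simp at hx

theorem pairwise_gt_pvHs (audio_rate : Int) :
    List.Pairwise (fun a b => b < a) (pvHs audio_rate) := by
  unfold pvHs; split_ifs with h <;> simp <;> omega

set_option maxHeartbeats 1000000 in
theorem main_eq (requested_rate audio_rate : Int) (supported : List Int) :
    candidate_sample_rates_py requested_rate audio_rate supported
      = candidate_sample_rates_py_alt requested_rate audio_rate supported := by
  -- abbreviations
  have hSnd := nodup_sortedSupported requested_rate supported
  have hRnd : (pvR requested_rate).Nodup := by unfold pvR; split_ifs <;> simp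
  have hsupnd : (pvSup supported).Nodup := PySem.Set.nodup_ofList _
  -- the three-stage append-filter decomposition of the dedup
  rw [a_eq_ofList]
  unfold candidate_sample_rates_py_alt
  rw [sorted2_eq_sorted_lex]
  set S := pvSortedSupported requested_rate supported with hSdef
  set R := pvR requested_rate with hRdef
  set Hs := pvHs audio_rate with hHsdef
  set Aud := pvAud audio_rate with hAuddef
  set K := fun r => (toLex ((pvPrio requested_rate audio_rate (pvSup supported) r).1,
      (pvPrio requested_rate audio_rate (pvSup supported) r).2) : Lex (Int × Lex (Int × Int)))
    with hKdef
  set F1 := S.filter (fun y => !R.contains y) with hF1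
  set t1 := R ++ F1 with ht1
  set F2 := Hs.filter (fun y => !t1.contains y) with hF2
  set t2 := t1 ++ F2 with ht2
  set F3 := Aud.filter (fun y => !t2.contains y) with hF3
  have hdecomp : PySem.Set.ofList (R ++ S ++ Hs ++ Aud) = t2 ++ F3 := by
    have hAudnd : Aud.Nodup := by rw [hAuddef]; unfold pvAud; split_ifs <;> simp
    have e1 : PySem.Set.update R S = t1 := by
      rw [PySem.Set.update_eq_append_filter, ofList_eq_self_of_nodup S hSnd, ht1, hF1]
      simp only [PySem.Set.contains_eq_listContains]
    have e2 : PySem.Set.update t1 Hs = t2 := by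
      rw [PySem.Set.update_eq_append_filter, ofList_eq_self_of_nodup Hs (hHsdef ▸ nodup_pvHs audio_rate), ht2, hF2]
      simp only [PySem.Set.contains_eq_listContains]
    have e3 : PySem.Set.update t2 Aud = t2 ++ F3 := by
      rw [PySem.Set.update_eq_append_filter, ofList_eq_self_of_nodup Aud hAudnd, hF3]
      simp only [PySem.Set.contains_eq_listContains]
    rw [PySem.Set.ofList_append, PySem.Set.ofList_append, PySem.Set.ofList_append,
        ofList_eq_self_of_nodup R hRnd, e1, e2, e3]
  -- memberships
  have hmemF1 : ∀ x, x ∈ F1 ↔ x ∈ pvSup supported ∧ x ∉ R := by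
    intro x
    simp [hF1, List.mem_filter, mem_sortedSupported, hSdef]
  have hmemt1 : ∀ x, x ∈ t1 ↔ x ∈ R ∨ x ∈ pvSup supported := by
    intro x; rw [ht1, List.mem_append, hmemF1 x]; tauto
  have hmemF2 : ∀ x, x ∈ F2 ↔ x ∈ Hs ∧ x ∉ R ∧ x ∉ pvSup supported := by
    intro x
    simp only [hF2, List.mem_filter, Bool.not_eq_eq_eq_not, Bool.not_true,
      List.contains_eq_mem, decide_eq_false_iff_not]
    rw [hmemt1 x]; tauto
  have hmemt2 : ∀ x, x ∈ t2 ↔ x ∈ R ∨ x ∈ pvSup supported ∨ x ∈ Hs := by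
    intro x; rw [ht2, List.mem_append, hmemt1 x, hmemF2 x]; tauto
  have hmemF3 : ∀ x, x ∈ F3 ↔ x ∈ Aud ∧ x ∉ R ∧ x ∉ pvSup supported ∧ x ∉ Hs := by
    intro x
    simp only [hF3, List.mem_filter, Bool.not_eq_eq_eq_not, Bool.not_true,
      List.contains_eq_mem, decide_eq_false_iff_not]
    rw [hmemt2 x]; tauto
  -- key evaluations on the four blocks
  have hKR : ∀ x ∈ R, K x = pvKey 0 0 0 := by
    intro x hx
    rcases (mem_pvR _ _).mp hx with ⟨h1, h2⟩
    simp [hKdef, pvPrio, pvKey, h1, h2]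
  have hKF1 : ∀ x ∈ F1, K x = pvKey 1 |x - requested_rate| x := by
    intro x hx
    rcases (hmemF1 x).mp hx with ⟨hsup, hnR⟩
    have h1 : ¬(requested_rate > 0 ∧ x = requested_rate) := by
      intro h; exact hnR ((mem_pvR _ _).mpr h)
    simp [hKdef, pvPrio, pvKey, h1, List.contains_eq_mem, hsup]
  have hKF2 : ∀ x ∈ F2, K x = pvKey 2 (-x) 0 := by
    intro x hx
    rcases (hmemF2 x).mp hx with ⟨hHsm, hnR, hnsup⟩
    have h1 : ¬(requested_rate > 0 ∧ x = requested_rate) := by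
      intro h; exact hnR ((mem_pvR _ _).mpr h)
    have h3 : x ≠ audio_rate := ne_audio_of_mem_pvHs _ _ (hHsdef ▸ hHsm)
    simp [hKdef, pvPrio, pvKey, h1, List.contains_eq_mem, hnsup, h3]
  have hKF3 : ∀ x ∈ F3, K x = pvKey 3 0 0 := by
    intro x hx
    rcases (hmemF3 x).mp hx with ⟨hA, hnR, hnsup, _⟩
    rcases (mem_pvAud _ _).mp hA with ⟨haud, hxa⟩
    have h1 : ¬(requested_rate > 0 ∧ x = requested_rate) := by
      intro h; exact hnR ((mem_pvR _ _).mpr h)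
    rw [hKdef]
    simp only [pvPrio]
    rw [if_neg h1, if_neg (by simpa [List.contains_eq_mem] using hnsup), if_pos hxa]
    rfl
  -- pairwise strict key-increase on the concatenation
  have hpF1 : List.Pairwise (fun a b => K a < K b) F1 := by
    have hlex : List.Pairwise
        (fun a b => (toLex (|a - requested_rate|, a) : Lex (Int × Int))
            ≤ toLex (|b - requested_rate|, b)) S := by
      have := PySem.List.sorted_pairwise
        (PySem.Set.ofList (supported.filter (fun r => decide (0 < r))))
        (fun v => (toLex (|v - requested_rate|, v) : Lex (Int × Int)))
      rw [← sorted2_eq_sorted_lex] at this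
      exact this
    have hne : List.Pairwise (fun a b => a ≠ b) S := hSnd
    refine ((hlex.and hne).filter _).imp_of_mem ?_
    intro a b ha hb ⟨hle, hab⟩
    rw [hKF1 a ha, hKF1 b hb, key_lt_iff]
    rcases Prod.Lex.toLex_le_toLex.mp hle with h | ⟨h1, h2⟩
    · exact Or.inl h
    · exact Or.inr ⟨h1, lt_of_le_of_ne h2 hab⟩
  have hpF2 : List.Pairwise (fun a b => K a < K b) F2 := by
    refine ((pairwise_gt_pvHs audio_rate).filter _).imp_of_mem ?_
    intro a b ha hb hba
    rw [hKF2 a ha, hKF2 b hb, key_lt_iff]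
    omega
  have hpF3 : List.Pairwise (fun a b => K a < K b) F3 := by
    have : Aud = [] ∨ ∃ y, Aud = [y] := by
      rw [hAuddef]; unfold pvAud; split_ifs <;> simp
    rcases this with h | ⟨y, h⟩ <;>
      · rw [hF3, h] <;> simp [List.filter] <;> split <;> simp
  have hpair : List.Pairwise (fun a b => K a < K b) (t2 ++ F3) := by
    rw [List.pairwise_append]
    refine ⟨?_, hpF3, ?_⟩
    · rw [ht2, List.pairwise_append]
      refine ⟨?_, hpF2, ?_⟩
      · rw [ht1, List.pairwise_append]
        refine ⟨?_, hpF1, ?_⟩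
        · rw [hRdef]; unfold pvR; split_ifs <;> simp
        · intro a ha b hb
          rw [hKR a ha, hKF1 b hb]
          exact key_lt_of_fst (by omega)
      · intro a ha b hb
        rcases List.mem_append.mp ha with h | h
        · rw [hKR a h, hKF2 b hb]; exact key_lt_of_fst (by omega)
        · rw [hKF1 a h, hKF2 b hb]; exact key_lt_of_fst (by omega)
    · intro a ha b hb
      rcases List.mem_append.mp ha with h | h
      · rcases List.mem_append.mp h with h' | h'
        · rw [hKR a h', hKF3 b hb]; exact key_lt_of_fst (by omega)
        · rw [hKF1 a h', hKF3 b hb]; exact key_lt_of_fst (by omega)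
      · rw [hKF2 a h, hKF3 b hb]; exact key_lt_of_fst (by omega)
  -- permutation with the candidate set
  have hndL : (t2 ++ F3).Nodup := by
    rw [← hdecomp]; exact PySem.Set.nodup_ofList _
  have hndC : (pvCands requested_rate audio_rate supported).Nodup := by
    rw [cands_eq]
    dsimp only
    split_ifs <;>
      first
        | exact PySem.Set.nodup_add _ _
            (PySem.Set.nodup_update _ _ (PySem.Set.nodup_add _ _ hsupnd))
        | exact PySem.Set.nodup_update _ _ (PySem.Set.nodup_add _ _ hsupnd)
        | exact PySem.Set.nodup_add _ _ (PySem.Set.nodup_update _ _ hsupnd)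
        | exact PySem.Set.nodup_update _ _ hsupnd
  have hperm : (t2 ++ F3).Perm (pvCands requested_rate audio_rate supported) := by
    rw [List.perm_ext_iff_of_nodup hndL hndC]
    intro a
    have hl : a ∈ t2 ++ F3 ↔ a ∈ R ∨ a ∈ pvSup supported ∨ a ∈ Hs ∨ a ∈ Aud := by
      rw [List.mem_append, hmemt2 a, hmemF3 a]
      by_cases h1 : a ∈ R <;> by_cases h2 : a ∈ pvSup supported <;>
        by_cases h3 : a ∈ Hs <;> tauto
    have hr : a ∈ pvCands requested_rate audio_rate supported ↔
        (requested_rate > 0 ∧ a = requested_rate) ∨ a ∈ pvSup supported ∨ a ∈ Hs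
          ∨ (0 < audio_rate ∧ a = audio_rate) := by
      rw [cands_eq]
      dsimp only
      split_ifs with h4 h5 <;>
        simp only [PySem.Set.mem_add, PySem.Set.mem_update] <;> tauto
    rw [hl, hr, mem_pvR, mem_pvAud]
  rw [hdecomp]
  exact (PySem.List.sorted_eq_of_perm_of_pairwise_lt _ _ K hperm hpair).symm

-- ===== VERDICT (by name: the statement is the Claim_ definition above) =====
theorem candidate_sample_rates_py_spec : Claim_equal_candidate_sample_rates_py := by
  intro requested_rate audio_rate supported _
  unfold Spec_candidate_sample_rates_py
  exact main_eq requested_rate audio_rate supported
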